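-- pv_equiv track=rewrite | github.com/Flissel/DaveLovable | backend/engine/src/services/pipeline_data_zipper.py | _zip_positional
-- ===== SOURCE A (Python) =====
-- from typing import Any, Callable, Dict, List, Optional
--
-- def _zip_positional(streams: List[Dict[str, Any]]) -> List[Dict[str, Any]]:
--     """Zip streams by index position."""
--     max_len = max((len(s["records"]) for s in streams), default=0)
--     records = []
--     for i in range(max_len):
--         merged: Dict[str, Any] = {}
--         for s in streams:
--             if i < len(s["records"]):
--                 merged.update(s["records"][i])
--         records.append(merged)
--     return records
-- ===== SOURCE B (Python) =====
-- from typing import Any, Dict, List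
--
--
-- def _zip_positional(streams: List[Dict[str, Any]]) -> List[Dict[str, Any]]:
--     """Zip streams by index position: single stream-major pass growing the result."""
--     records: List[Dict[str, Any]] = []
--     for s in streams:
--         for i, rec in enumerate(s["records"]):
--             if i < len(records):
--                 records[i].update(rec)
--             else:
--                 records.append(dict(rec))
--     return records
-- ===== Notes on version B (the rewrite author's own statement) =====
-- stated objective: alternative
-- what changed: Replaced the max-length precomputation plus position-major rebuild of each merged dict with a single stream-major pass that grows the result list as its accumulator, updating existing merged dicts in place and appending fresh copies for new positions.
import Mathlib
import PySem

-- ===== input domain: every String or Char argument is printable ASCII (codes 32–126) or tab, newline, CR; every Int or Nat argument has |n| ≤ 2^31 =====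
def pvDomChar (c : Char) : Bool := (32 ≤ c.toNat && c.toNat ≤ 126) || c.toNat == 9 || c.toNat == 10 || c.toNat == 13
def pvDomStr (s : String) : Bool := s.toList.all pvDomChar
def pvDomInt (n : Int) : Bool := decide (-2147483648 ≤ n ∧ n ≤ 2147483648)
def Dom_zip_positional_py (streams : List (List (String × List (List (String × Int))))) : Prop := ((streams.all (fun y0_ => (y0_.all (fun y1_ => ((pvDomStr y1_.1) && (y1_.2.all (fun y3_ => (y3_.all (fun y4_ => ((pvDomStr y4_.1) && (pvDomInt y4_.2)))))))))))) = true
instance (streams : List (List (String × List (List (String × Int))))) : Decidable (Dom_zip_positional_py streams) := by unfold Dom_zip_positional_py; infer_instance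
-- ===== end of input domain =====

-- B replaces A's max-length precomputation + position-major rebuild by one stream-major
-- pass that grows the result list as its accumulator (objective: alternative decomposition).

-- ===== PORT A =====
-- s["records"]  (first-match dict lookup; Pre_ guarantees the key is present — where it is
-- absent Python raises KeyError, so the `.getD []` default never reaches a claimed input)
def pvRecs (s : List (String × List (List (String × Int)))) : List (List (String × Int)) :=
  ((PySem.Dict.mk s).get? "records").getD []

def zip_positional_py (streams : List (List (String × List (List (String × Int))))) : List (List (String × Int)) :=
  -- max_len = max((len(s["records"]) for s in streams), default=0)
  let maxLen : Int := PySem.List.maxD (streams.map (fun s => PySem.List.len (pvRecs s))) id 0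
  -- for i in range(max_len): merged = {}; for s in streams: if i < len(...): merged.update(s["records"][i]); records.append(merged)
  (PySem.List.pyRange 0 maxLen).foldl
    (fun recs i =>
      recs ++ [(streams.foldl
        (fun merged s =>
          if i < PySem.List.len (pvRecs s) then
            merged.update (PySem.List.pyGetD (pvRecs s) i [])
          else merged)
        (PySem.Dict.empty : PySem.Dict String Int)).items])
    []

-- ===== PORT B =====
-- loop body of B's inner loop: if i < len(records): records[i].update(rec) else: records.append(dict(rec))
-- (i comes from enumerate, so 0 ≤ i and `.toNat` under the guard is Python-exact)
def pvIStep (recs : List (PySem.Dict String Int)) (p : Int × List (String × Int)) : List (PySem.Dict String Int) :=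
  if p.1 < PySem.List.len recs then
    recs.set p.1.toNat ((PySem.List.pyGetD recs p.1 PySem.Dict.empty).update p.2)
  else
    recs ++ [PySem.Dict.ofList p.2]

def zip_positional_py_alt (streams : List (List (String × List (List (String × Int))))) : List (List (String × Int)) :=
  -- records = []; for s in streams: for i, rec in enumerate(s["records"]): pvIStep
  (streams.foldl
    (fun recs s => (PySem.List.enumerate (pvRecs s)).foldl pvIStep recs)
    ([] : List (PySem.Dict String Int))).map PySem.Dict.items

-- ===== PRECONDITION & SPEC =====
-- Pre_ excludes exactly the streams lacking a "records" key, on which A raises KeyError.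
def Pre_zip_positional_py (streams : List (List (String × List (List (String × Int))))) : Prop :=
  (streams.all (fun s => (PySem.Dict.mk s).contains "records")) = true
instance (streams : List (List (String × List (List (String × Int))))) : Decidable (Pre_zip_positional_py streams) := by unfold Pre_zip_positional_py; infer_instance

def pvWitness_zip_positional_py : (List (List (String × List (List (String × Int))))) :=
  [[("records", [[("a", 1)], [("b", 2)]])], [("records", [[("a", 7), ("c", 3)]])]]

def Spec_zip_positional_py (streams : List (List (String × List (List (String × Int))))) (out : List (List (String × Int))) : Prop := out = zip_positional_py_alt streams
instance (streams : List (List (String × List (List (String × Int))))) (out : List (List (String × Int))) : Decidable (Spec_zip_positional_py streams out) := by unfold Spec_zip_positional_py; infer_instance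

-- ===== CLAIM (what is proved, stated in full; the proofs are below) =====
def Claim_equal_zip_positional_py : Prop := ∀ (streams : List (List (String × List (List (String × Int))))), Dom_zip_positional_py streams → Pre_zip_positional_py streams → Spec_zip_positional_py streams (zip_positional_py streams)

-- ===== LEMMAS AND PROOFS =====

-- merged dict at position k, merged in stream order (the value A computes for index k)
def pvMergeD (ss : List (List (String × List (List (String × Int))))) (k : Nat) : PySem.Dict String Int :=
  ss.foldl (fun d s => if k < (pvRecs s).length then d.update ((pvRecs s).getD k []) else d) PySem.Dict.empty

-- Nat-valued max_len
def pvMaxN (ss : List (List (String × List (List (String × Int))))) : Nat :=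
  ss.foldl (fun m s => max m (pvRecs s).length) 0

lemma pvFoldl_opt_max (f : Option Int → Int → Option Int)
    (hf : ∀ m x, f (some m) x = some (max m x)) :
    ∀ (xs : List Int) (m : Int), xs.foldl f (some m) = some (xs.foldl max m) := by
  intro xs
  induction xs with
  | nil => intro m; rfl
  | cons x xs ih => intro m; rw [List.foldl_cons, hf, ih, List.foldl_cons]

lemma pvFoldl_max_cast (ss : List (List (String × List (List (String × Int))))) (m : Nat) :
    ss.foldl (fun acc s => max acc (PySem.List.len (pvRecs s))) (m : Int)
      = ((ss.foldl (fun acc s => max acc (pvRecs s).length) m : Nat) : Int) := by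
  induction ss generalizing m with
  | nil => rfl
  | cons s ss ih =>
    have hcast : ((max m (pvRecs s).length : Nat) : Int)
        = max (m : Int) (PySem.List.len (pvRecs s)) := by
      simp [PySem.List.len_eq, Nat.cast_max]
    rw [List.foldl_cons, List.foldl_cons, ← hcast, ih]

lemma pvMax_eq (ss : List (List (String × List (List (String × Int))))) :
    PySem.List.maxD (ss.map (fun s => PySem.List.len (pvRecs s))) id 0 = ((pvMaxN ss : Nat) : Int) := by
  cases ss with
  | nil => rfl
  | cons s ss =>
    unfold PySem.List.maxD PySem.List.max?
    rw [List.map_cons, List.foldl_cons]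
    show (List.foldl _ (some (PySem.List.len (pvRecs s)))
        (ss.map (fun s => PySem.List.len (pvRecs s)))).getD 0 = ((pvMaxN (s :: ss) : Nat) : Int)
    rw [pvFoldl_opt_max _ (fun m x => by
        show (if id m < id x then some x else some m) = some (max m x)
        simp only [id]
        split_ifs with h
        · rw [max_eq_right h.le]
        · rw [max_eq_left (not_lt.mp h)]),
      Option.getD_some, List.foldl_map]
    have h0 : PySem.List.len (pvRecs s) = ((max 0 (pvRecs s).length : Nat) : Int) := by
      simp [PySem.List.len_eq]
    rw [h0]
    exact pvFoldl_max_cast ss _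

lemma pvMergeD_cast (ss : List (List (String × List (List (String × Int))))) (k : Nat)
    (d : PySem.Dict String Int) :
    ss.foldl (fun merged s => if (k : Int) < PySem.List.len (pvRecs s) then
        merged.update (PySem.List.pyGetD (pvRecs s) (k : Int) []) else merged) d
      = ss.foldl (fun d s => if k < (pvRecs s).length then d.update ((pvRecs s).getD k []) else d) d := by
  have hf : (fun (merged : PySem.Dict String Int) s => if (k : Int) < PySem.List.len (pvRecs s) then
        merged.update (PySem.List.pyGetD (pvRecs s) (k : Int) []) else merged)
      = (fun d s => if k < (pvRecs s).length then d.update ((pvRecs s).getD k []) else d) := by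
    funext d s
    simp [PySem.List.len_eq, PySem.List.pyGetD_natCast, Nat.cast_lt]
  rw [hf]

lemma pvA_char (ss : List (List (String × List (List (String × Int))))) :
    zip_positional_py ss = (List.range (pvMaxN ss)).map (fun k => (pvMergeD ss k).items) := by
  have hA : zip_positional_py ss
      = (PySem.List.pyRange 0 (PySem.List.maxD (ss.map (fun s => PySem.List.len (pvRecs s))) id 0)).foldl
          (fun recs i => recs ++ [(ss.foldl
            (fun merged s => if i < PySem.List.len (pvRecs s) then
              merged.update (PySem.List.pyGetD (pvRecs s) i []) else merged)
            (PySem.Dict.empty : PySem.Dict String Int)).items]) [] := rfl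
  rw [hA, pvMax_eq, PySem.List.pyRange_zero_nat,
    PySem.List.foldl_append_singleton_eq_map
      (f := fun i : Int => (ss.foldl
        (fun merged s => if i < PySem.List.len (pvRecs s) then
          merged.update (PySem.List.pyGetD (pvRecs s) i []) else merged)
        (PySem.Dict.empty : PySem.Dict String Int)).items),
    List.map_map, List.nil_append]
  refine List.map_congr_left (fun k _ => ?_)
  show (ss.foldl (fun merged s => if (k : Int) < PySem.List.len (pvRecs s) then
      merged.update (PySem.List.pyGetD (pvRecs s) (k : Int) []) else merged)
      (PySem.Dict.empty : PySem.Dict String Int)).items = (pvMergeD ss k).items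
  rw [pvMergeD_cast]
  rfl

lemma pvLen_le_maxN (ss : List (List (String × List (List (String × Int))))) :
    ∀ s ∈ ss, (pvRecs s).length ≤ pvMaxN ss := by
  intro s hs
  have h : pvMaxN ss = (ss.map (fun s => (pvRecs s).length)).foldl max 0 := by
    rw [List.foldl_map]; rfl
  rw [h]
  exact (PySem.List.le_foldl_max _ 0).2 _ (List.mem_map_of_mem hs)

lemma pvMergeD_empty (ss : List (List (String × List (List (String × Int))))) (k : Nat)
    (h : pvMaxN ss ≤ k) : pvMergeD ss k = PySem.Dict.empty := by
  have key : ∀ (l : List (List (String × List (List (String × Int))))) (d : PySem.Dict String Int),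
      (∀ s ∈ l, ¬ k < (pvRecs s).length) →
      l.foldl (fun d s => if k < (pvRecs s).length then d.update ((pvRecs s).getD k []) else d) d = d := by
    intro l
    induction l with
    | nil => intro d _; rfl
    | cons s l ih =>
      intro d hall
      rw [List.foldl_cons, if_neg (hall s (by simp))]
      exact ih d (fun t ht => hall t (by simp [ht]))
  exact key ss PySem.Dict.empty (fun s hs => by have := pvLen_le_maxN ss s hs; omega)

lemma pvGetD_set (l : List (PySem.Dict String Int)) (i : Nat) (a d : PySem.Dict String Int)
    (h : i < l.length) (k : Nat) :
    (l.set i a).getD k d = if k = i then a else l.getD k d := by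
  rcases eq_or_ne k i with rfl | hne
  · simp [List.getD_eq_getElem?_getD, h]
  · simp [List.getD_eq_getElem?_getD, List.getElem?_set_ne (by omega : i ≠ k), hne]

lemma pvGetD_snoc (l : List (PySem.Dict String Int)) (a d : PySem.Dict String Int) (k : Nat) :
    (l ++ [a]).getD k d = if k < l.length then l.getD k d else if k = l.length then a else d := by
  rcases lt_trichotomy k l.length with h | h | h
  · simp [List.getD_eq_getElem?_getD, List.getElem?_append_left h, h]
  · subst h; simp [List.getD_eq_getElem?_getD]
  · have h1 : ¬ k < l.length := by omega
    have h2 : k ≠ l.length := by omega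
    have h3 : (l ++ [a]).length ≤ k := by simp; omega
    simp [List.getD_eq_getElem?_getD, List.getElem?_eq_none h3, h1, h2]

lemma pvGetD_out (l : List (PySem.Dict String Int)) (k : Nat) (h : l.length ≤ k) :
    l.getD k PySem.Dict.empty = PySem.Dict.empty := by
  rw [List.getD_eq_getElem?_getD, List.getElem?_eq_none h, Option.getD_none]

lemma pvMap_range_getD (l : List (PySem.Dict String Int)) (d : PySem.Dict String Int) :
    (List.range l.length).map (fun k => l.getD k d) = l := by
  apply List.ext_getElem
  · simp
  · intro i h1 h2
    simp [List.getD_eq_getElem?_getD, h2]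

lemma pvInner_char (xs : List (List (String × Int))) :
    ∀ (recs : List (PySem.Dict String Int)) (j : Nat), j ≤ recs.length →
    (PySem.List.enumerate xs (j : Int)).foldl pvIStep recs =
      (List.range (max recs.length (j + xs.length))).map (fun k =>
        if j ≤ k ∧ k < j + xs.length then
          (recs.getD k PySem.Dict.empty).update (xs.getD (k - j) [])
        else recs.getD k PySem.Dict.empty) := by
  induction xs with
  | nil =>
    intro recs j hj
    rw [PySem.List.enumerate_nil, List.foldl_nil, List.length_nil, Nat.add_zero,
      Nat.max_eq_left hj]
    have h : ∀ k : Nat, ¬ (j ≤ k ∧ k < j) := by omega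
    simp only [h, if_false]
    rw [pvMap_range_getD]
  | cons x xs ih =>
    intro recs j hj
    rw [PySem.List.enumerate_cons, List.foldl_cons]
    show List.foldl pvIStep (pvIStep recs ((j : Int), x)) _ = _
    by_cases h : j < recs.length
    · have hg : pvIStep recs ((j : Int), x)
          = recs.set j ((recs.getD j PySem.Dict.empty).update x) := by
        show (if ((j : Int), x).1 < PySem.List.len recs then
            recs.set ((j : Int), x).1.toNat
              ((PySem.List.pyGetD recs ((j : Int), x).1 PySem.Dict.empty).update ((j : Int), x).2)
          else recs ++ [PySem.Dict.ofList ((j : Int), x).2]) = _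
        rw [if_pos (show ((j : Int), x).1 < PySem.List.len recs by
          show (j : Int) < PySem.List.len recs
          rw [PySem.List.len_eq]; exact_mod_cast h)]
        show recs.set ((j : Int)).toNat
            ((PySem.List.pyGetD recs ((j : Int)) PySem.Dict.empty).update x) = _
        rw [PySem.List.pyGetD_natCast, Int.toNat_natCast]
      rw [hg, show (j : Int) + 1 = ((j + 1 : Nat) : Int) by push_cast; ring,
        ih _ (j + 1) (by rw [List.length_set]; omega)]
      apply List.ext_getElem
      · simp only [List.length_map, List.length_range, List.length_set, List.length_cons]
        omega
      · intro k hk1 hk2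
        simp only [List.length_map, List.length_range, List.length_set, List.length_cons]
          at hk1 hk2
        simp only [List.getElem_map, List.getElem_range]
        rw [pvGetD_set recs j _ PySem.Dict.empty h k]
        rcases Nat.lt_trichotomy k j with hkj | heq | hkj
        · rw [if_neg (show ¬ (j + 1 ≤ k ∧ k < j + 1 + xs.length) by omega),
            if_neg (show ¬ (k = j) by omega),
            if_neg (show ¬ (j ≤ k ∧ k < j + (x :: xs).length) by omega)]
        · rw [if_neg (show ¬ (j + 1 ≤ k ∧ k < j + 1 + xs.length) by omega),
            if_pos (show k = j from heq),
            if_pos (show j ≤ k ∧ k < j + (x :: xs).length by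
              simp only [List.length_cons]; omega),
            show k - j = 0 by omega, List.getD_cons_zero, heq]
        · by_cases hr : k < j + 1 + xs.length
          · rw [if_pos (show j + 1 ≤ k ∧ k < j + 1 + xs.length from ⟨by omega, hr⟩),
              if_neg (show ¬ (k = j) by omega),
              if_pos (show j ≤ k ∧ k < j + (x :: xs).length by
                simp only [List.length_cons]; omega),
              show k - j = (k - (j + 1)) + 1 by omega, List.getD_cons_succ]
          · rw [if_neg (show ¬ (j + 1 ≤ k ∧ k < j + 1 + xs.length) by omega),
              if_neg (show ¬ (k = j) by omega),
              if_neg (show ¬ (j ≤ k ∧ k < j + (x :: xs).length) by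
                simp only [List.length_cons]; omega)]
    · have hjl : j = recs.length := by omega
      have hg : pvIStep recs ((j : Int), x) = recs ++ [PySem.Dict.ofList x] := by
        show (if ((j : Int), x).1 < PySem.List.len recs then
            recs.set ((j : Int), x).1.toNat
              ((PySem.List.pyGetD recs ((j : Int), x).1 PySem.Dict.empty).update ((j : Int), x).2)
          else recs ++ [PySem.Dict.ofList ((j : Int), x).2]) = _
        rw [if_neg (show ¬ ((j : Int), x).1 < PySem.List.len recs by
          show ¬ (j : Int) < PySem.List.len recs
          rw [PySem.List.len_eq]; exact_mod_cast h)]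
      rw [hg, show (j : Int) + 1 = ((j + 1 : Nat) : Int) by push_cast; ring,
        ih _ (j + 1) (by
          simp only [List.length_append, List.length_cons, List.length_nil]; omega)]
      apply List.ext_getElem
      · simp only [List.length_map, List.length_range, List.length_append,
          List.length_cons, List.length_nil]
        omega
      · intro k hk1 hk2
        simp only [List.length_map, List.length_range, List.length_append,
          List.length_cons, List.length_nil] at hk1 hk2
        simp only [List.getElem_map, List.getElem_range]
        rw [pvGetD_snoc recs (PySem.Dict.ofList x) PySem.Dict.empty k]
        rcases Nat.lt_trichotomy k j with hkj | heq | hkj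
        · rw [if_neg (show ¬ (j + 1 ≤ k ∧ k < j + 1 + xs.length) by omega),
            if_pos (show k < recs.length by omega),
            if_neg (show ¬ (j ≤ k ∧ k < j + (x :: xs).length) by omega)]
        · rw [if_neg (show ¬ (j + 1 ≤ k ∧ k < j + 1 + xs.length) by omega),
            if_neg (show ¬ (k < recs.length) by omega),
            if_pos (show k = recs.length by omega),
            if_pos (show j ≤ k ∧ k < j + (x :: xs).length by
              simp only [List.length_cons]; omega),
            show k - j = 0 by omega, List.getD_cons_zero,
            pvGetD_out recs k (by omega)]
          rfl
        · by_cases hr : k < j + 1 + xs.length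
          · rw [if_pos (show j + 1 ≤ k ∧ k < j + 1 + xs.length from ⟨by omega, hr⟩),
              if_neg (show ¬ (k < recs.length) by omega),
              if_neg (show ¬ (k = recs.length) by omega),
              if_pos (show j ≤ k ∧ k < j + (x :: xs).length by
                simp only [List.length_cons]; omega),
              pvGetD_out recs k (by omega),
              show k - j = (k - (j + 1)) + 1 by omega, List.getD_cons_succ]
          · rw [if_neg (show ¬ (j + 1 ≤ k ∧ k < j + 1 + xs.length) by omega),
              if_neg (show ¬ (k < recs.length) by omega),
              if_neg (show ¬ (k = recs.length) by omega),
              if_neg (show ¬ (j ≤ k ∧ k < j + (x :: xs).length) by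
                simp only [List.length_cons]; omega),
              pvGetD_out recs k (by omega)]

lemma pvB_char (ss : List (List (String × List (List (String × Int))))) :
    ss.foldl (fun recs s => (PySem.List.enumerate (pvRecs s)).foldl pvIStep recs)
      ([] : List (PySem.Dict String Int)) =
    (List.range (pvMaxN ss)).map (pvMergeD ss) := by
  induction ss using List.reverseRecOn with
  | nil => rfl
  | append_singleton ss s ih =>
    rw [List.foldl_append, List.foldl_cons, List.foldl_nil, ih]
    have h0 : PySem.List.enumerate (pvRecs s)
        = PySem.List.enumerate (pvRecs s) (((0 : Nat) : Int)) := by norm_num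
    rw [h0, pvInner_char (pvRecs s) _ 0 (Nat.zero_le _)]
    have hmax : pvMaxN (ss ++ [s]) = max (pvMaxN ss) (pvRecs s).length := by
      simp [pvMaxN, List.foldl_append]
    have hmerge : ∀ k : Nat, pvMergeD (ss ++ [s]) k
        = if k < (pvRecs s).length then (pvMergeD ss k).update ((pvRecs s).getD k [])
          else pvMergeD ss k := by
      intro k
      simp [pvMergeD, List.foldl_append]
    have hgd : ∀ k : Nat, ((List.range (pvMaxN ss)).map (pvMergeD ss)).getD k PySem.Dict.empty
        = if k < pvMaxN ss then pvMergeD ss k else PySem.Dict.empty := by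
      intro k
      by_cases hkM : k < pvMaxN ss
      · rw [List.getD_eq_getElem?_getD, List.getElem?_map, List.getElem?_range hkM]
        simp [hkM]
      · rw [pvGetD_out _ k (by simp; omega), if_neg hkM]
    apply List.ext_getElem
    · simp only [List.length_map, List.length_range, Nat.zero_add, hmax]
    · intro k hk1 hk2
      simp only [List.length_map, List.length_range, hmax] at hk2
      simp only [List.getElem_map, List.getElem_range]
      rw [hmerge k, hgd k]
      by_cases hkn : k < (pvRecs s).length
      · rw [if_pos (show (0 : Nat) ≤ k ∧ k < 0 + (pvRecs s).length from ⟨Nat.zero_le _, by omega⟩),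
          Nat.sub_zero, if_pos hkn]
        by_cases hkM : k < pvMaxN ss
        · rw [if_pos hkM]
        · rw [if_neg hkM, pvMergeD_empty ss k (by omega)]
      · have hkM : k < pvMaxN ss := by omega
        rw [if_neg (show ¬ ((0 : Nat) ≤ k ∧ k < 0 + (pvRecs s).length) by omega),
          if_pos hkM, if_neg hkn]

-- ===== VERDICT (by name: the statement is the Claim_ definition above) =====
theorem zip_positional_py_spec : Claim_equal_zip_positional_py := by
  intro ss _ _
  show zip_positional_py ss = zip_positional_py_alt ss
  rw [pvA_char, zip_positional_py_alt, pvB_char, List.map_map]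
  rfl
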